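-- pv_equiv track=rewrite | github.com/zahias/course_mapping | config.py | cell_color
-- ===== SOURCE A (Python) =====
-- COMPLETION_COLOR_MAP = {
--     "c": "background-color: #28a745",  # solid green for completed courses
--     "cr": "background-color: #FFFACD",  # pale yellow for current registrations
--     "nc": "background-color: #f8d7da",  # light red for not completed
-- }
--
-- def cell_color(value: str) -> str:
--     """
--     Applies background colors for cells showing one or more
--     'GRADE | credit' entries (comma-separated).
--
--     Collapsed completion toggle values ("c", "cr", "nc") map directly to their
--     associated colors, while the legacy "GRADE | credit" strings retain the
--     previous logic:
--       - Any "CR" entry ⇒ pale yellow.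
--       - Any passing credit (>0 or "PASS") ⇒ solid green.
--       - Otherwise ⇒ light red.
--     """
--     if not isinstance(value, str):
--         return ""
--
--     collapsed = value.strip().lower()
--     if collapsed in COMPLETION_COLOR_MAP:
--         return COMPLETION_COLOR_MAP[collapsed]
--
--     # Split into individual entries like "F | 0" and "C- | 3"
--     entries = [e.strip() for e in value.split(",") if e.strip()]
--
--     # 1) If any entry is a current registration, color yellow
--     for entry in entries:
--         if entry.upper().startswith("CR"):
--             return "background-color: #FFFACD"
--
--     # 2) If any entry indicates passing credit (>0 or PASS), color green
--     for entry in entries: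
--         parts = entry.split("|")
--         if len(parts) == 2:
--             right = parts[1].strip().upper()
--             # numeric credits
--             try:
--                 if int(right) > 0:
--                     return COMPLETION_COLOR_MAP["c"]
--             except ValueError:
--                 # PASS for zero-credit courses
--                 if right == "PASS":
--                     return COMPLETION_COLOR_MAP["c"]
--
--     # 3) Otherwise, not passed
--     return COMPLETION_COLOR_MAP["nc"]
-- ===== SOURCE B (Python) =====
-- # Classify each entry to a rank (0=CR, 1=passing, 2=other) and take the minimum
-- # rank, instead of A's two separate early-returning scans; collapsed toggles by
-- # an if-chain instead of a dict lookup.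
-- COLORS = ("background-color: #FFFACD",   # 0: current registration
--           "background-color: #28a745",   # 1: passing
--           "background-color: #f8d7da")   # 2: not completed
--
-- def _rank(entry):
--     if entry.upper().startswith("CR"):
--         return 0
--     parts = entry.split("|")
--     if len(parts) == 2:
--         right = parts[1].strip().upper()
--         try:
--             if int(right) > 0:
--                 return 1
--         except ValueError:
--             if right == "PASS":
--                 return 1
--     return 2
--
-- def cell_color(value: str) -> str:
--     if not isinstance(value, str):
--         return ""
--     collapsed = value.strip().lower()
--     if collapsed == "c":
--         return COLORS[1]
--     if collapsed == "cr":
--         return COLORS[0]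
--     if collapsed == "nc":
--         return COLORS[2]
--     best = 2
--     for piece in value.split(","):
--         entry = piece.strip()
--         if entry:
--             best = min(best, _rank(entry))
--     return COLORS[best]
-- ===== Notes on version B (the rewrite author's own statement) =====
-- stated objective: alternative
-- what changed: A's dict lookup plus two early-returning any-scans are replaced by an if-chain on the collapsed toggle and a single pass that ranks every entry (0=CR, 1=passing, 2=other), keeps the minimum rank and indexes a color table with it.
import Mathlib
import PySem

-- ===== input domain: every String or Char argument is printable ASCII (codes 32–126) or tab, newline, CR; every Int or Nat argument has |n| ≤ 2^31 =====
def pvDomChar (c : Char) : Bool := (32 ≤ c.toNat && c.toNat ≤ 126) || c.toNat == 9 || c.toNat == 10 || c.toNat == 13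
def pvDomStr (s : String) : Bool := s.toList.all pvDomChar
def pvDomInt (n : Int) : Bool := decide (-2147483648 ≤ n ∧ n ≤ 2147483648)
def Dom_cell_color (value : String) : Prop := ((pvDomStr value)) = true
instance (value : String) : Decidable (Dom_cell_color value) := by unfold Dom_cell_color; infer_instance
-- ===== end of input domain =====

-- B replaces A's dict lookup + two early-returning any-scans by an if-chain on the
-- collapsed toggle and a single min-fold over per-entry ranks (0=CR, 1=passing, 2=other)
-- indexed into a color table; objective: alternative decomposition, same cost.
-- (A's isinstance guard is vacuous under the String type and is not ported.)

-- ===== PORT A =====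
def completionColorMap : PySem.Dict String String :=
  PySem.Dict.ofList
    [("c", "background-color: #28a745"),
     ("cr", "background-color: #FFFACD"),
     ("nc", "background-color: #f8d7da")]

-- the body of A's second loop: entry.split("|"), len==2, int(right)>0 / "PASS"
def cellPassEntry (entry : String) : Bool :=
  let parts := (PySem.Str.split? entry "|").getD []
  if parts.length == 2 then
    let right := PySem.Str.upper (PySem.Str.strip (parts.getD 1 ""))
    match PySem.Int.ofStr? right with
    | some n => decide (0 < n)
    | none => right == "PASS"
  else false

def cell_color (value : String) : String :=
  let collapsed := PySem.Str.lower (PySem.Str.strip value)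
  match completionColorMap.get? collapsed with
  | some c => c
  | none =>
    let entries := (((PySem.Str.split? value ",").getD []).map PySem.Str.strip).filter (fun e => e != "")
    if entries.any (fun e => PySem.Str.startswith (PySem.Str.upper e) "CR") then
      "background-color: #FFFACD"
    else if entries.any cellPassEntry then
      "background-color: #28a745"
    else
      "background-color: #f8d7da"

-- ===== PORT B =====
def pvColors : List String :=
  ["background-color: #FFFACD", "background-color: #28a745", "background-color: #f8d7da"]

-- Source B's _rank: 0 for a CR entry, 1 for a passing "GRADE | credit" entry, else 2
def rankEntry (entry : String) : Nat :=
  if PySem.Str.startswith (PySem.Str.upper entry) "CR" then 0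
  else
    let parts := (PySem.Str.split? entry "|").getD []
    if parts.length == 2 then
      let right := PySem.Str.upper (PySem.Str.strip (parts.getD 1 ""))
      match PySem.Int.ofStr? right with
      | some n => if 0 < n then 1 else 2
      | none => if right == "PASS" then 1 else 2
    else 2

def cell_color_alt (value : String) : String :=
  let collapsed := PySem.Str.lower (PySem.Str.strip value)
  if collapsed == "c" then pvColors.getD 1 ""
  else if collapsed == "cr" then pvColors.getD 0 ""
  else if collapsed == "nc" then pvColors.getD 2 ""
  else
    let best := ((PySem.Str.split? value ",").getD []).foldl
      (fun best piece =>
        let entry := PySem.Str.strip piece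
        if entry == "" then best else min best (rankEntry entry)) 2
    pvColors.getD best ""

-- ===== PRECONDITION & SPEC =====
def Spec_cell_color (value : String) (out : String) : Prop := out = cell_color_alt value
instance (value : String) (out : String) : Decidable (Spec_cell_color value out) := by unfold Spec_cell_color; infer_instance

-- ===== CLAIM =====
def Claim_equal_cell_color : Prop := ∀ (value : String), Dom_cell_color value → Spec_cell_color value (cell_color value)

-- ===== LEMMAS AND PROOFS =====

theorem pvRank_le_two (e : String) : rankEntry e ≤ 2 := by
  unfold rankEntry
  dsimp only
  split_ifs <;> try omega
  all_goals
    cases PySem.Int.ofStr? (PySem.Str.upper (PySem.Str.strip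
        (((PySem.Str.split? e "|").getD []).getD 1 ""))) with
    | some n => dsimp only; split_ifs <;> omega
    | none => dsimp only; omega
theorem pvRank_eq_zero_iff (e : String) :
    rankEntry e = 0 ↔ PySem.Str.startswith (PySem.Str.upper e) "CR" = true := by
  unfold rankEntry
  dsimp only
  split_ifs with h1 h2 h3
  · exact iff_of_true rfl h1
  · refine iff_of_false ?_ h1
    cases PySem.Int.ofStr? (PySem.Str.upper (PySem.Str.strip
        (((PySem.Str.split? e "|").getD []).getD 1 ""))) with
    | some n => dsimp only; split_ifs <;> simp
    | none => dsimp only; simp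
  · refine iff_of_false ?_ h1
    cases PySem.Int.ofStr? (PySem.Str.upper (PySem.Str.strip
        (((PySem.Str.split? e "|").getD []).getD 1 ""))) with
    | some n => dsimp only; split_ifs <;> simp
    | none => dsimp only; simp
  · exact iff_of_false (by simp) h1
theorem pvRank_eq_one_iff (e : String)
    (hcr : PySem.Str.startswith (PySem.Str.upper e) "CR" = false) :
    rankEntry e = 1 ↔ cellPassEntry e = true := by
  unfold rankEntry cellPassEntry
  rw [if_neg (by rw [hcr]; simp)]
  dsimp only
  by_cases h : ((((PySem.Str.split? e "|").getD []).length == 2)) = true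
  · rw [if_pos h, if_pos h]
    cases PySem.Int.ofStr? (PySem.Str.upper (PySem.Str.strip
        (((PySem.Str.split? e "|").getD []).getD 1 ""))) with
    | some n =>
      dsimp only
      split_ifs with hn
      · exact iff_of_true rfl (by simpa using hn)
      · exact iff_of_false (by omega) (by simpa using hn)
    | none =>
      dsimp only
      by_cases hp : (PySem.Str.upper (PySem.Str.strip
          (((PySem.Str.split? e "|").getD []).getD 1 "")) == "PASS") = true
      · rw [if_pos hp]; exact iff_of_true rfl hp
      · rw [if_neg hp]; exact iff_of_false (by omega) hp
  · rw [if_neg h, if_neg h]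
    simp

-- B's skipping min-fold over the pieces equals the min-fold over A's entries list
theorem pvFold_skip_eq (ps : List String) (a : Nat) :
    ps.foldl
      (fun best piece =>
        let entry := PySem.Str.strip piece
        if entry == "" then best else min best (rankEntry entry)) a
    = ((ps.map PySem.Str.strip).filter (fun e => e != "")).foldl
        (fun best e => min best (rankEntry e)) a := by
  induction ps generalizing a with
  | nil => rfl
  | cons p t ih =>
    simp only [List.map_cons, List.filter_cons, List.foldl_cons]
    by_cases h : (PySem.Str.strip p == "") = true
    · have hne : (PySem.Str.strip p != "") = false := by simp_all [bne]
      simp only [h, if_true, hne]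
      simpa using ih a
    · have hb : (PySem.Str.strip p == "") = false := by simpa using h
      have hne : (PySem.Str.strip p != "") = true := by simp [bne, hb]
      simp only [hb, hne, Bool.false_eq_true, if_false, if_true, List.foldl_cons]
      exact ih _

-- the infimum of the entry ranks, as a foldr
def pvInf (es : List String) : Nat :=
  es.foldr (fun e m => min (rankEntry e) m) 2

theorem pvInf_le_two (es : List String) : pvInf es ≤ 2 := by
  induction es with
  | nil => simp [pvInf]
  | cons e t ih => simp only [pvInf, List.foldr_cons] at *; omega

theorem pvFoldl_min_eq_inf (es : List String) (a : Nat) (ha : a ≤ 2) :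
    es.foldl (fun best e => min best (rankEntry e)) a = min a (pvInf es) := by
  induction es generalizing a with
  | nil => simp [pvInf]; omega
  | cons e t ih =>
    simp only [List.foldl_cons, pvInf, List.foldr_cons] at *
    rw [ih (min a (rankEntry e)) (by omega)]
    omega

theorem pvInf_cases (es : List String) :
    pvInf es
    = (if es.any (fun e => rankEntry e = 0) then 0
       else if es.any (fun e => rankEntry e = 1) then 1 else 2) := by
  induction es with
  | nil => simp [pvInf]
  | cons e t ih =>
    have h2 := pvRank_le_two e
    simp only [pvInf, List.foldr_cons, List.any_cons] at *
    rw [ih]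
    by_cases ht0 : (t.any fun e => decide (rankEntry e = 0)) = true <;>
    by_cases ht1 : (t.any fun e => decide (rankEntry e = 1)) = true <;>
    by_cases he0 : rankEntry e = 0 <;> by_cases he1 : rankEntry e = 1 <;>
      simp [ht0, ht1, he0, he1] <;> omega

-- the min-fold over entries versus A's two any-scans
theorem pvMin_fold_cases (es : List String) :
    pvColors.getD (es.foldl (fun best e => min best (rankEntry e)) 2) ""
    = (if es.any (fun e => PySem.Str.startswith (PySem.Str.upper e) "CR") then
        "background-color: #FFFACD"
      else if es.any cellPassEntry then
        "background-color: #28a745"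
      else
        "background-color: #f8d7da") := by
  rw [pvFoldl_min_eq_inf es 2 (le_refl 2), Nat.min_eq_right (pvInf_le_two es), pvInf_cases]
  by_cases hcr : (es.any fun e => PySem.Str.startswith (PySem.Str.upper e) "CR") = true
  · have h0 : (es.any fun e => decide (rankEntry e = 0)) = true := by
      simp only [List.any_eq_true] at hcr ⊢
      obtain ⟨e, he, hp⟩ := hcr
      exact ⟨e, he, by simp only [decide_eq_true_eq, pvRank_eq_zero_iff]; simpa using hp⟩
    rw [if_pos h0, if_pos hcr]
    rfl
  · have hcrm : ∀ e ∈ es, PySem.Str.startswith (PySem.Str.upper e) "CR" = false := by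
      intro e he
      exact Bool.eq_false_iff.mpr (List.any_eq_false.mp (Bool.eq_false_iff.mpr hcr) e he)
    have h0 : ¬ (es.any fun e => decide (rankEntry e = 0)) = true := by
      simp only [List.any_eq_true, not_exists]
      intro e
      simp only [not_and, decide_eq_true_eq, pvRank_eq_zero_iff]
      intro he
      simpa using hcrm e he
    have h1 : (es.any fun e => decide (rankEntry e = 1)) = es.any cellPassEntry := by
      cases hx : es.any cellPassEntry with
      | true =>
        simp only [List.any_eq_true] at hx ⊢
        obtain ⟨e, he, hc⟩ := hx
        exact ⟨e, he, by simp [pvRank_eq_one_iff e (hcrm e he), hc]⟩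
      | false =>
        simp only [List.any_eq_false] at hx ⊢
        intro e he
        have := hx e he
        simp only [decide_eq_true_eq, pvRank_eq_one_iff e (hcrm e he)]
        exact this
    rw [if_neg h0, if_neg hcr, h1]
    cases hp : es.any cellPassEntry with
    | true => rw [if_pos rfl, if_pos rfl]; rfl
    | false =>
      rw [if_neg (by simp), if_neg (by simp)]
      rfl

-- the 3-key dict lookup as an if-chain
theorem pvDict_lookup_cases (s : String) :
    completionColorMap.get? s
    = (if s == "c" then some "background-color: #28a745"
       else if s == "cr" then some "background-color: #FFFACD"
       else if s == "nc" then some "background-color: #f8d7da"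
       else none) := by
  have hmk : completionColorMap = PySem.Dict.mk
      [("c", "background-color: #28a745"),
       ("cr", "background-color: #FFFACD"),
       ("nc", "background-color: #f8d7da")] := by rfl
  rw [hmk]
  by_cases h1 : s = "c"
  · subst h1; rfl
  · by_cases h2 : s = "cr"
    · subst h2; rfl
    · by_cases h3 : s = "nc"
      · subst h3; rfl
      · rw [if_neg (by simp [h1]), if_neg (by simp [h2]), if_neg (by simp [h3])]
        simp [beq_iff_eq, Ne.symm h1, Ne.symm h2, Ne.symm h3, PySem.Dict.get?]

-- ===== VERDICT =====
theorem cell_color_spec : Claim_equal_cell_color := by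
  intro value _
  show cell_color value = cell_color_alt value
  unfold cell_color cell_color_alt
  dsimp only
  rw [pvDict_lookup_cases]
  by_cases hc : (PySem.Str.lower (PySem.Str.strip value) == "c") = true
  · simp [hc, pvColors]
  · by_cases hcr : (PySem.Str.lower (PySem.Str.strip value) == "cr") = true
    · simp [hc, hcr, pvColors]
    · by_cases hnc : (PySem.Str.lower (PySem.Str.strip value) == "nc") = true
      · simp [hc, hcr, hnc, pvColors]
      · simp only [hc, hcr, hnc, Bool.false_eq_true, if_false]
        rw [pvFold_skip_eq, pvMin_fold_cases]
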